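-- pv_equiv track=rewrite | github.com/chenye95/LeetCode_Progress | 788_RotatedDigits.py | rotated_digits_construct
-- ===== SOURCE A (Python) =====
-- s1 = {1, 8, 0}
--
-- s2 = {1, 8, 0, 6, 9, 2, 5}
--
-- def rotated_digits_construct(n: int) -> int:
--     """
--     :param n: 1 <= n <= 10000
--     :return: number of 0 <= i <= n such that if digits of i rotated 180 degrees result in a new valid number
--     """
--     count = 0
--     n_digit = len(str(n))
--     # max digits in each position to ensure less or equal to n
--     # confirmed_digits = set()
--     confirmed_subset_s1 = True
--     # from the most significant to least significant, set the digits
--     for i, max_digit_i in enumerate(map(int, str(n))):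
--         for digit_i in range(max_digit_i):
--             if digit_i in s2:
--                 count += 7 ** (n_digit - i - 1)
--             if confirmed_subset_s1 and digit_i in s1:
--                 count -= 3 ** (n_digit - i - 1)
--         if max_digit_i not in s2:
--             return count
--         # confirmed_digits.add(max_digit_i)
--         confirmed_subset_s1 = confirmed_subset_s1 and max_digit_i in s1
--     return count if confirmed_subset_s1 else count + 1
-- ===== SOURCE B (Python) =====
-- S1 = frozenset({0, 1, 8})
-- S2 = frozenset({0, 1, 2, 5, 6, 8, 9})
--
-- def _all_in(m, s):
--     # every decimal digit of m lies in s
--     while m >= 10: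
--         if m % 10 not in s:
--             return False
--         m //= 10
--     return m in s
--
-- def _count_le(n, s):
--     # how many i in 0..n have every decimal digit in s (0 is in s for both uses)
--     if n < 10:
--         return sum(1 for d in range(n + 1) if d in s)
--     q, r = divmod(n, 10)
--     return len(s) * _count_le(q - 1, s) + (sum(1 for d in range(r + 1) if d in s) if _all_in(q, s) else 0)
--
-- def rotated_digits_construct(n: int) -> int:
--     return _count_le(n, S2) - _count_le(n, S1)
-- ===== Notes on version B (the rewrite author's own statement) =====
-- stated objective: alternative
-- what changed: Replaced A's fused most-significant-first scan (powers of 7 and 3 per prefix, early return, self-rotation flag) by the difference of two calls to one generic counter of numbers with all digits in a given set, computed by least-significant-first recursion on n // 10.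
import Mathlib
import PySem

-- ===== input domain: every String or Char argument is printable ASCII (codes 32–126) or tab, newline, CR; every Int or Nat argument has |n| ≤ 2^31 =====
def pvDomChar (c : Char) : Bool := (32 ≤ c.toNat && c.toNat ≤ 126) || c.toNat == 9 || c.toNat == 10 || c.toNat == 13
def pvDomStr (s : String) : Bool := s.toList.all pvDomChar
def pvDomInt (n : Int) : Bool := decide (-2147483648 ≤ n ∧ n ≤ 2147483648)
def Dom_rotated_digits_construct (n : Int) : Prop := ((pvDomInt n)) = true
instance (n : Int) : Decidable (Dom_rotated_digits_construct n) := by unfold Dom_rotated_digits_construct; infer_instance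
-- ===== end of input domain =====

-- B replaces A's fused most-significant-first combinatorial scan (powers of 7 and 3,
-- early return, self-rotation flag) by the difference of two generic 'all digits in s'
-- counters computed by least-significant-first recursion on n // 10 (objective: alternative).

-- ===== PORT A =====
-- module constants s1 = {1, 8, 0} and s2 = {1, 8, 0, 6, 9, 2, 5} as membership tests
def pvS1mem (d : Int) : Bool := d == 1 || d == 8 || d == 0
def pvS2mem (d : Int) : Bool := d == 1 || d == 8 || d == 0 || d == 6 || d == 9 || d == 2 || d == 5

-- inner 'for digit_i in range(max_digit_i)' loop; the exponent n_digit-i-1 is ≥ 0 at every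
-- call the Python makes (i indexes str(n)), so '.toNat' is exact there
def pvInner (nDigit i maxd : Int) (conf : Bool) (count : Int) : Int :=
  (PySem.List.pyRange 0 maxd 1).foldl (fun c d =>
    let c := if pvS2mem d then c + 7 ^ (nDigit - i - 1).toNat else c
    if conf && pvS1mem d then c - 3 ^ (nDigit - i - 1).toNat else c) count

-- the 'for i, max_digit_i in enumerate(...)' loop with its early return
def pvLoopA (nDigit : Int) : List (Int × Int) → Int → Bool → Int
  | [], count, conf => if conf then count else count + 1
  | (i, maxd) :: rest, count, conf =>
    let count' := pvInner nDigit i maxd conf count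
    if !(pvS2mem maxd) then count'
    else pvLoopA nDigit rest count' (conf && pvS1mem maxd)

def rotated_digits_construct (n : Int) : Int :=
  -- str(n); map(int, str(n)) = int of each one-char string (never none on the admitted n ≥ 0)
  let s := PySem.Int.toChars n
  let digs := s.map (fun c => (PySem.Int.ofChars? [c]).getD 0)
  pvLoopA (PySem.List.len s) (PySem.List.enumerate digs 0) 0 true

-- ===== PORT B =====
-- module constants S1 = frozenset({0, 1, 8}), S2 = frozenset({0, 1, 2, 5, 6, 8, 9})
def pvS1L : PySem.Set Int := PySem.Set.ofList [0, 1, 8]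
def pvS2L : PySem.Set Int := PySem.Set.ofList [0, 1, 2, 5, 6, 8, 9]

-- _all_in(m, s): the while loop with its early return, as recursion on m // 10
def pvAllIn (m : Int) (s : PySem.Set Int) : Bool :=
  if h : 10 ≤ m then
    if !(s.contains (PySem.Int.mod m 10)) then false
    else pvAllIn (PySem.Int.floordiv m 10) s
  else s.contains m
termination_by m.toNat
decreasing_by
  rw [PySem.Int.floordiv_eq_ediv_of_pos (by norm_num : (0 : Int) < 10)]
  omega

-- the generator expression 'sum(1 for d in range(b) if d in s)' (used twice in _count_le)
def pvSumRange (b : Int) (s : PySem.Set Int) : Int :=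
  (PySem.List.pyRange 0 b 1).foldl (fun acc d => if s.contains d then acc + 1 else acc) 0

-- _count_le(n, s)
def pvCountLe (n : Int) (s : PySem.Set Int) : Int :=
  if h : n < 10 then pvSumRange (n + 1) s
  else
    PySem.List.len s * pvCountLe (PySem.Int.floordiv n 10 - 1) s +
      (if pvAllIn (PySem.Int.floordiv n 10) s then pvSumRange (PySem.Int.mod n 10 + 1) s else 0)
termination_by n.toNat
decreasing_by
  rw [PySem.Int.floordiv_eq_ediv_of_pos (by norm_num : (0 : Int) < 10)]
  omega

def rotated_digits_construct_alt (n : Int) : Int :=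
  pvCountLe n pvS2L - pvCountLe n pvS1L

-- ===== PRECONDITION & SPEC =====
-- A raises ValueError on n < 0 (int('-') while mapping int over str(n)); Pre_ excludes exactly those.
def Pre_rotated_digits_construct (n : Int) : Prop := 0 ≤ n
instance (n : Int) : Decidable (Pre_rotated_digits_construct n) := by unfold Pre_rotated_digits_construct; infer_instance
def pvWitness_rotated_digits_construct : Int := 10

def Spec_rotated_digits_construct (n : Int) (out : Int) : Prop := out = rotated_digits_construct_alt n
instance (n : Int) (out : Int) : Decidable (Spec_rotated_digits_construct n out) := by unfold Spec_rotated_digits_construct; infer_instance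

-- ===== CLAIM (what is proved, stated in full; the proofs are below) =====
def Claim_equal_rotated_digits_construct : Prop := ∀ (n : Int), Dom_rotated_digits_construct n → Pre_rotated_digits_construct n → Spec_rotated_digits_construct n (rotated_digits_construct n)

-- ===== LEMMAS AND PROOFS =====

-- digit predicates on Nat
def pvS1n (d : Nat) : Bool := pvS1mem (d : Int)
def pvS2n (d : Nat) : Bool := pvS2mem (d : Int)
-- 'all digits of m lie in s'
def pvG (s : Nat → Bool) (m : Nat) : Bool := (Nat.digits 10 m).all s
-- number of i < m whose digits all lie in s
def pvSum (s : Nat → Bool) (m : Nat) : Int := ((List.range m).countP (pvG s) : Int)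
-- number of digit strings over s of length |D|, lexicographically ≤ D
def pvCnt (c : Int) (s : Nat → Bool) : List Nat → Int
  | [] => 1
  | d :: rest => ((List.range d).countP s : Int) * c ^ rest.length + (if s d then pvCnt c s rest else 0)
-- value of a most-significant-first digit list
def pvVal (D : List Nat) : Nat := D.foldl (fun a d => 10 * a + d) 0
-- most-significant-first digit list of m, as str(m) shows it
def pvD (m : Nat) : List Nat := if m = 0 then [0] else (Nat.digits 10 m).reverse

theorem pvS1_imp (d : Nat) (h : pvS1n d = true) : pvS2n d = true := by
  simp [pvS1n, pvS2n, pvS1mem, pvS2mem] at *; tauto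

theorem pvDigitsSplit (u e : Nat) (he : e < 10) (h : 0 < 10 * u + e) :
    Nat.digits 10 (10 * u + e) = e :: Nat.digits 10 u := by
  rw [Nat.digits_def' (by norm_num : (1:Nat) < 10) h]
  congr 1
  · omega
  · congr 1; omega

theorem pvGsplit (s : Nat → Bool) (h0 : s 0 = true) (u e : Nat) (he : e < 10) :
    pvG s (10 * u + e) = (pvG s u && s e) := by
  by_cases h : 10 * u + e = 0
  · have hu : u = 0 := by omega
    have he0 : e = 0 := by omega
    subst hu; subst he0; simp [pvG, h0]
  · rw [pvG, pvDigitsSplit u e he (by omega), List.all_cons, Bool.and_comm]; rfl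

theorem pvBlock (s : Nat → Bool) (h0 : s 0 = true) (u d : Nat) (hd : d ≤ 10) :
    (List.range d).countP (fun e => pvG s (10 * u + e)) =
      if pvG s u then (List.range d).countP s else 0 := by
  have h1 : (List.range d).countP (fun e => pvG s (10 * u + e)) =
      (List.range d).countP (fun e => pvG s u && s e) := by
    apply List.countP_congr
    intro e he
    rw [List.mem_range] at he
    rw [pvGsplit s h0 u e (by omega)]
  rw [h1]
  cases hg : pvG s u
  · simp
  · simp

theorem pvSum_succ (s : Nat → Bool) (m : Nat) :
    pvSum s (m + 1) = pvSum s m + (if pvG s m then 1 else 0) := by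
  unfold pvSum
  rw [List.range_succ, List.countP_append]
  cases hg : pvG s m <;> simp [List.countP_cons, hg]

theorem pvSum_mul (s : Nat → Bool) (h0 : s 0 = true) (u : Nat) :
    pvSum s (10 * u) = ((List.range 10).countP s : Int) * pvSum s u := by
  induction u with
  | zero => simp [pvSum]
  | succ u ih =>
    have h10 : 10 * (u + 1) = 10 * u + 10 := by ring
    have hstep : pvSum s (10 * (u + 1)) = pvSum s (10 * u) +
        (if pvG s u then ((List.range 10).countP s : Int) else 0) := by
      unfold pvSum
      rw [h10, List.range_add, List.countP_append, List.countP_map]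
      rw [show ((pvG s) ∘ (fun x => 10 * u + x)) = (fun e => pvG s (10 * u + e)) from rfl]
      rw [pvBlock s h0 u 10 (le_refl 10)]
      cases hg : pvG s u <;> simp
    rw [hstep, ih, pvSum_succ s u]
    cases hg : pvG s u <;> simp [hg] <;> ring

theorem pvSum_split (s : Nat → Bool) (h0 : s 0 = true) (u d : Nat) (hd : d ≤ 10) :
    pvSum s (10 * u + d) = ((List.range 10).countP s : Int) * pvSum s u +
      (if pvG s u then ((List.range d).countP s : Int) else 0) := by
  have h1 : pvSum s (10 * u + d) = pvSum s (10 * u) +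
      (if pvG s u then ((List.range d).countP s : Int) else 0) := by
    unfold pvSum
    rw [List.range_add, List.countP_append, List.countP_map]
    rw [show ((pvG s) ∘ (fun x => 10 * u + x)) = (fun e => pvG s (10 * u + e)) from rfl]
    rw [pvBlock s h0 u d hd]
    cases hg : pvG s u <;> simp
  rw [h1, pvSum_mul s h0 u]

theorem pvVal_append (D : List Nat) (d : Nat) : pvVal (D ++ [d]) = 10 * pvVal D + d := by
  simp [pvVal, List.foldl_append]

theorem pvCnt_append (c : Int) (s : Nat → Bool) (D : List Nat) (d : Nat) :
    pvCnt c s (D ++ [d]) = c * (pvCnt c s D - (if D.all s then 1 else 0)) +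
      (if D.all s then ((List.range (d + 1)).countP s : Int) else 0) := by
  induction D with
  | nil =>
    simp only [List.nil_append, pvCnt, List.all_nil, if_true, List.length_nil, pow_zero]
    rw [List.range_succ, List.countP_append]
    cases hd : s d <;> simp [List.countP_cons, hd] <;> push_cast <;> ring
  | cons e D ih =>
    simp only [List.cons_append, pvCnt, List.length_append, List.length_cons,
      List.length_nil, List.all_cons]
    rw [ih]
    by_cases hse : s e = true <;> by_cases hall : D.all s = true <;>
      simp [hse, hall] <;> ring

theorem pvMain (c : Int) (s : Nat → Bool) (h0 : s 0 = true)
    (hc : ((List.range 10).countP s : Int) = c) :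
    ∀ D : List Nat, (∀ x ∈ D, x < 10) →
      D.all s = pvG s (pvVal D) ∧ pvCnt c s D = pvSum s (pvVal D + 1) := by
  intro D
  induction D using List.reverseRecOn with
  | nil =>
    intro _
    constructor
    · simp [pvVal, pvG]
    · simp [pvCnt, pvVal, pvSum, List.range_succ, List.countP_cons, pvG]
  | append_singleton D d ih =>
    intro hD
    have hd : d < 10 := hD d (by simp)
    have hD' : ∀ x ∈ D, x < 10 := fun x hx => hD x (by simp [hx])
    obtain ⟨ha, hb⟩ := ih hD'
    have hva : pvVal (D ++ [d]) = 10 * pvVal D + d := pvVal_append D d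
    constructor
    · rw [List.all_append, hva, pvGsplit s h0 _ d hd, ← ha]
      simp
    · rw [pvCnt_append, hva, ha, hb]
      have hsplit := pvSum_split s h0 (pvVal D) (d + 1) (by omega)
      rw [hc] at hsplit
      rw [show 10 * pvVal D + d + 1 = 10 * pvVal D + (d + 1) by ring, hsplit,
        pvSum_succ s (pvVal D)]
      cases hg : pvG s (pvVal D) <;> simp [hg] <;> ring

theorem pvVal_reverse (L : List Nat) : pvVal L.reverse = Nat.ofDigits 10 L := by
  induction L with
  | nil => simp [pvVal, Nat.ofDigits_nil]
  | cons d L ih =>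
    rw [List.reverse_cons, pvVal_append, ih, Nat.ofDigits_cons]
    omega

theorem pvVal_pvD (m : Nat) : pvVal (pvD m) = m := by
  unfold pvD
  split_ifs with h
  · subst h; decide
  · rw [pvVal_reverse, Nat.ofDigits_digits]

theorem pvD_lt (m : Nat) : ∀ x ∈ pvD m, x < 10 := by
  unfold pvD
  split_ifs with h
  · simp
  · intro x hx
    rw [List.mem_reverse] at hx
    exact Nat.digits_lt_base (by norm_num) hx

theorem pvToDigitsCore_eq : ∀ (fuel m : Nat) (acc : List Char), 0 < m → m < fuel →
    Nat.toDigitsCore 10 fuel m acc = ((Nat.digits 10 m).map Nat.digitChar).reverse ++ acc := by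
  intro fuel
  induction fuel with
  | zero => intro m acc h1 h2; omega
  | succ f ih =>
    intro m acc h1 h2
    simp only [Nat.toDigitsCore]
    by_cases h10 : m / 10 = 0
    · simp only [h10, if_true]
      have hm : m < 10 := by omega
      rw [Nat.digits_def' (by norm_num : (1:Nat) < 10) h1]
      have : Nat.digits 10 (m / 10) = [] := by rw [h10]; simp
      rw [this]
      simp [Nat.mod_eq_of_lt hm]
    · simp only [h10, if_false]
      rw [ih (m / 10) _ (by omega) (by omega)]
      rw [Nat.digits_def' (by norm_num : (1:Nat) < 10) h1]
      simp

theorem pvToChars_eq (m : Nat) : PySem.Int.toChars (m : Int) = (pvD m).map Nat.digitChar := by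
  unfold PySem.Int.toChars pvD
  rw [if_neg (by omega : ¬ ((m : Int) < 0))]
  rw [show ((m : Int)).toNat = m by omega]
  by_cases h : m = 0
  · subst h; decide
  · rw [if_neg h, Nat.toDigits, pvToDigitsCore_eq (m + 1) m [] (by omega) (by omega)]
    simp [List.map_reverse]

theorem pvInner_eq (nd i : Int) (dn : Nat) (conf : Bool) (count : Int) (k : Nat)
    (hk : (nd - i - 1).toNat = k) :
    pvInner nd i (dn : Int) conf count =
      count + ((List.range dn).countP pvS2n : Int) * 7 ^ k -
        (if conf then ((List.range dn).countP pvS1n : Int) * 3 ^ k else 0) := by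
  induction dn generalizing count with
  | zero =>
    simp [pvInner, PySem.List.pyRange_one_eq_nil]
  | succ dn ih =>
    unfold pvInner at ih ⊢
    rw [show ((dn + 1 : Nat) : Int) = (dn : Int) + 1 by push_cast; ring]
    rw [PySem.List.pyRange_one_succ_right (by positivity), List.foldl_append, ih]
    simp only [List.foldl_cons, List.foldl_nil, hk]
    rw [show pvS2mem (dn : Int) = pvS2n dn from rfl, show pvS1mem (dn : Int) = pvS1n dn from rfl]
    rw [List.range_succ, List.countP_append, List.countP_append]
    cases conf <;> cases hs2 : pvS2n dn <;> cases hs1 : pvS1n dn <;>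
      simp [List.countP_cons, hs2, hs1] <;> push_cast <;> ring

theorem pvLoopA_eq (nd : Int) :
    ∀ (D : List Nat) (i count : Int) (conf : Bool), (∀ x ∈ D, x < 10) →
      i + D.length = nd →
      pvLoopA nd (PySem.List.enumerate (D.map Int.ofNat) i) count conf =
        count + pvCnt 7 pvS2n D - (if conf then pvCnt 3 pvS1n D else 0) := by
  intro D
  induction D generalizing nd with
  | nil =>
    intro i count conf _ _
    simp only [List.map_nil, PySem.List.enumerate_nil, pvLoopA, pvCnt]
    cases conf <;> simp
  | cons d D ih =>
    intro i count conf hlt hlen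
    rw [List.map_cons, PySem.List.enumerate_cons, pvLoopA]
    have hd : d < 10 := hlt d (by simp)
    have hD' : ∀ x ∈ D, x < 10 := fun x hx => hlt x (by simp [hx])
    have hlen0 : i + ((d :: D).length : Int) = nd := hlen
    have hexp : (nd - i - 1).toNat = D.length := by
      simp only [List.length_cons] at hlen0
      push_cast at hlen0 ⊢
      omega
    have hlen' : (i + 1) + (D.length : Int) = nd := by
      simp only [List.length_cons] at hlen0
      push_cast at hlen0 ⊢
      omega
    rw [show (Int.ofNat d) = ((d : Nat) : Int) from rfl]
    rw [pvInner_eq nd i d conf count D.length hexp]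
    rw [show pvS2mem ((d : Nat) : Int) = pvS2n d from rfl, show pvS1mem ((d : Nat) : Int) = pvS1n d from rfl]
    cases hs2 : pvS2n d
    · have hs1 : pvS1n d = false := by
        cases h : pvS1n d
        · rfl
        · exact absurd (pvS1_imp d h) (by simp [hs2])
      simp only [Bool.not_false, if_true, pvCnt, hs2, hs1, if_false, List.length_cons]
      cases conf <;> simp
    · simp only [Bool.not_true, if_false]
      rw [ih nd (i + 1) _ (conf && pvS1n d) hD' hlen']
      simp only [pvCnt, hs2, if_true, List.length_cons]
      cases conf <;> cases hs1 : pvS1n d <;> simp [hs1] <;> ring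

theorem pvA_eq (m : Nat) :
    rotated_digits_construct (m : Int) = pvSum pvS2n (m + 1) - pvSum pvS1n (m + 1) := by
  show pvLoopA (PySem.List.len (PySem.Int.toChars (m : Int)))
      (PySem.List.enumerate ((PySem.Int.toChars (m : Int)).map
        (fun c => (PySem.Int.ofChars? [c]).getD 0)) 0) 0 true =
      pvSum pvS2n (m + 1) - pvSum pvS1n (m + 1)
  rw [pvToChars_eq]
  have hdigs : ((pvD m).map Nat.digitChar).map (fun c => (PySem.Int.ofChars? [c]).getD 0) =
      (pvD m).map Int.ofNat := by
    rw [List.map_map]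
    apply List.map_congr_left
    intro d hd
    have h10 : d < 10 := pvD_lt m d hd
    interval_cases d <;> rfl
  rw [hdigs]
  have hlen : PySem.List.len ((pvD m).map Nat.digitChar) = ((pvD m).length : Int) := by
    simp [PySem.List.len_eq]
  rw [hlen]
  rw [pvLoopA_eq _ (pvD m) 0 0 true (pvD_lt m) (by simp)]
  have h2 := (pvMain 7 pvS2n (by decide) (by decide) (pvD m) (pvD_lt m)).2
  have h1 := (pvMain 3 pvS1n (by decide) (by decide) (pvD m) (pvD_lt m)).2
  rw [h2, h1, pvVal_pvD]
  simp

theorem pvG_lt10 (sn : Nat → Bool) (h0 : sn 0 = true) (d : Nat) (hd : d < 10) :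
    pvG sn d = sn d := by
  by_cases h : d = 0
  · subst h; simp [pvG, h0]
  · rw [pvG, Nat.digits_def' (by norm_num : (1 : Nat) < 10) (by omega), Nat.mod_eq_of_lt hd]
    rw [show d / 10 = 0 by omega]
    simp

theorem pvSumRange_eq (sL : PySem.Set Int) (sn : Nat → Bool)
    (hcompat : ∀ d : Nat, d < 10 → sL.contains ((d : Nat) : Int) = sn d)
    (b : Nat) (hb : b ≤ 10) :
    pvSumRange ((b : Nat) : Int) sL = ((List.range b).countP sn : Int) := by
  unfold pvSumRange
  rw [PySem.List.foldl_count_if, PySem.List.pyRange_one, List.countP_map]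
  rw [show (((b : Nat) : Int) - 0).toNat = b by omega]
  rw [List.countP_congr (q := sn) ?_]
  · simp
  · intro k hk
    rw [List.mem_range] at hk
    rw [show ((fun d => sL.contains d) ∘ (fun k : Nat => (0 : Int) + k)) k
        = sL.contains ((k : Nat) : Int) by simp]
    rw [hcompat k (by omega)]

theorem pvAllIn_eq (sL : PySem.Set Int) (sn : Nat → Bool) (h0 : sn 0 = true)
    (hcompat : ∀ d : Nat, d < 10 → sL.contains ((d : Nat) : Int) = sn d) :
    ∀ m : Nat, pvAllIn ((m : Nat) : Int) sL = pvG sn m := by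
  intro m
  induction m using Nat.strong_induction_on with
  | _ m ih =>
    by_cases h : m < 10
    · rw [pvAllIn, dif_neg (by omega : ¬ (10 : Int) ≤ ((m : Nat) : Int))]
      rw [hcompat m h, pvG_lt10 sn h0 m h]
    · rw [pvAllIn, dif_pos (by omega : (10 : Int) ≤ ((m : Nat) : Int))]
      rw [show (10 : Int) = ((10 : Nat) : Int) from rfl, PySem.Int.mod_natCast,
        PySem.Int.floordiv_natCast]
      rw [hcompat (m % 10) (by omega), ih (m / 10) (by omega)]
      rw [show pvG sn m = (Nat.digits 10 m).all sn from rfl,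
        Nat.digits_def' (by norm_num : (1 : Nat) < 10) (by omega : 0 < m), List.all_cons]
      cases hs : sn (m % 10) <;> simp [hs, pvG]

theorem pvCountLe_eq (sL : PySem.Set Int) (sn : Nat → Bool) (h0 : sn 0 = true)
    (hcompat : ∀ d : Nat, d < 10 → sL.contains ((d : Nat) : Int) = sn d)
    (c : Int) (hc : ((List.range 10).countP sn : Int) = c)
    (hlen : PySem.List.len sL = c) :
    ∀ m : Nat, pvCountLe ((m : Nat) : Int) sL = pvSum sn (m + 1) := by
  intro m
  induction m using Nat.strong_induction_on with
  | _ m ih =>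
    by_cases h : m < 10
    · rw [pvCountLe, dif_pos (by omega : ((m : Nat) : Int) < 10)]
      rw [show ((m : Nat) : Int) + 1 = ((m + 1 : Nat) : Int) by push_cast; ring]
      rw [pvSumRange_eq sL sn hcompat (m + 1) (by omega)]
      unfold pvSum
      congr 1
      apply List.countP_congr
      intro k hk
      rw [List.mem_range] at hk
      rw [pvG_lt10 sn h0 k (by omega)]
    · rw [pvCountLe, dif_neg (by omega : ¬ ((m : Nat) : Int) < 10)]
      rw [show (10 : Int) = ((10 : Nat) : Int) from rfl, PySem.Int.mod_natCast,
        PySem.Int.floordiv_natCast]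
      rw [show ((m / 10 : Nat) : Int) - 1 = ((m / 10 - 1 : Nat) : Int) by omega]
      rw [ih (m / 10 - 1) (by omega)]
      rw [show (m / 10 - 1) + 1 = m / 10 by omega]
      rw [show ((m % 10 : Nat) : Int) + 1 = ((m % 10 + 1 : Nat) : Int) by push_cast; ring]
      rw [pvSumRange_eq sL sn hcompat (m % 10 + 1) (by omega)]
      rw [pvAllIn_eq sL sn h0 hcompat (m / 10)]
      rw [hlen]
      have hsplit := pvSum_split sn h0 (m / 10) (m % 10 + 1) (by omega)
      rw [hc] at hsplit
      rw [show m + 1 = 10 * (m / 10) + (m % 10 + 1) by omega, hsplit]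

theorem pvCompat1 : ∀ d : Nat, d < 10 → pvS1L.contains ((d : Nat) : Int) = pvS1n d := by
  intro d hd
  interval_cases d <;> decide

theorem pvCompat2 : ∀ d : Nat, d < 10 → pvS2L.contains ((d : Nat) : Int) = pvS2n d := by
  intro d hd
  interval_cases d <;> decide

theorem pvB_eq (m : Nat) :
    rotated_digits_construct_alt (m : Int) = pvSum pvS2n (m + 1) - pvSum pvS1n (m + 1) := by
  unfold rotated_digits_construct_alt
  rw [pvCountLe_eq pvS2L pvS2n (by decide) pvCompat2 7 (by decide) (by decide) m,
    pvCountLe_eq pvS1L pvS1n (by decide) pvCompat1 3 (by decide) (by decide) m]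

-- ===== VERDICT (by name: the statement is the Claim_ definition above) =====
theorem rotated_digits_construct_spec : Claim_equal_rotated_digits_construct := by
  intro n _ hp
  unfold Pre_rotated_digits_construct at hp
  unfold Spec_rotated_digits_construct
  have hn : n = ((n.toNat : Nat) : Int) := by omega
  rw [hn, pvA_eq, pvB_eq]
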